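-- pv_equiv track=rewrite | github.com/cinderella-ag/cases-research | code + data/ContextSearch.py | prev_word
-- ===== SOURCE A (Python) =====
-- def get_word(sentence):  # поиск целевого слова в предложении
--     word_amount = 0
--     is_first = 0
--     is_last = 0
--     index = 0
--
--     for i in range(len(sentence)):
--         if sentence[i].isalpha():
--             word_amount += 1
--
--         elif len(sentence[i]) > 4 and sentence[i][0] == '[' and sentence[i][1] == '[' and sentence[i][
--             len(sentence[i]) - 2] == ']' and sentence[i][
--             len(sentence[i]) - 1] == ']':
--
--             word_amount += 1
--             word = sentence[i][2:len(sentence[i]) - 2]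
--             index = i
--
--             is_last = word_amount
--             if word_amount == 1:
--                 is_first = 1
--
--     if is_last == word_amount:
--         is_last = 1
--     else:
--         is_last = 0
--
--     is_capitalized = 0
--     if word[0].isupper():
--         is_capitalized = 1
--
--     return word, is_first, is_last, is_capitalized, index
--
-- def prev_word(sentence):  # поиск предыдущего слова
--     index = get_word(sentence)[4]
--     prev = ''
--     for i in range(index - 1, -1, -1):
--         if sentence[i].isalpha():
--             prev = sentence[i]
--             break
--     return prev
-- ===== SOURCE B (Python) =====
-- def prev_word(sentence):  # single forward pass: track last alphabetic token; snapshot it at each marked word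
--     prev = None
--     last_alpha = ''
--     for token in sentence:
--         if len(token) > 4 and token.startswith('[[') and token.endswith(']]'):
--             prev = last_alpha
--         elif token.isalpha():
--             last_alpha = token
--     if prev is None:  # no [[marked]] token: invalid input (A's get_word fails here too)
--         raise ValueError('no marked word in sentence')
--     return prev
-- ===== Notes on version B (the rewrite author's own statement) =====
-- stated objective: simpler
-- what changed: Replaces get_word's full five-field bookkeeping pass followed by a second backward scan with break by one forward pass that keeps the last alphabetic token seen and snapshots it at each [[marked]] token; Pre_ excludes only the sentences with no [[marked]] token, on which A's get_word raises UnboundLocalError.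
import Mathlib
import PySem

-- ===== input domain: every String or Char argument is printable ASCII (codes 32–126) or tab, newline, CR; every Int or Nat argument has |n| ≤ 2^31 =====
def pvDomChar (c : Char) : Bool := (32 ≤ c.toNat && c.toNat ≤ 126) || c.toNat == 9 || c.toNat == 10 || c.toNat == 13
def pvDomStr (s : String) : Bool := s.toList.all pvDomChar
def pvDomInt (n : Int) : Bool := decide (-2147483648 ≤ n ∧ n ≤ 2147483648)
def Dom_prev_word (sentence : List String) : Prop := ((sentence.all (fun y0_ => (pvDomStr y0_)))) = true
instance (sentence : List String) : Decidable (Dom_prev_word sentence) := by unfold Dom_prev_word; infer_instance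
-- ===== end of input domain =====

-- B replaces A's two passes (get_word bookkeeping + backward scan with break) by one forward pass
-- that tracks the last alphabetic token and snapshots it at each [[marked]] token (objective: simpler).


-- ===== PORT A =====
-- the elif test: len(t) > 4 and t[0]=='[' and t[1]=='[' and t[-2nd]==']' and t[-1st]==']'
-- (indices are literal; all are in range once len(t) > 4, so comparing the Options to 'some _' is exact)
def isMarkerA (t : String) : Bool :=
  decide (4 < PySem.Str.len t) &&
  (PySem.Str.pyGet? t 0 == some '[') && (PySem.Str.pyGet? t 1 == some '[') &&
  (PySem.Str.pyGet? t (PySem.Str.len t - 2) == some ']') &&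
  (PySem.Str.pyGet? t (PySem.Str.len t - 1) == some ']')

-- the for-loop of get_word; state = (word_amount, is_first, is_last, index, word), word none = not yet assigned
def gwLoop (xs : List String) (i : Int)
    (st : Int × Int × Int × Int × Option String) : Int × Int × Int × Int × Option String :=
  match xs with
  | [] => st
  | t :: rest =>
    if PySem.Str.strIsalpha t then
      gwLoop rest (i + 1) (st.1 + 1, st.2.1, st.2.2.1, st.2.2.2.1, st.2.2.2.2)
    else if isMarkerA t then
      gwLoop rest (i + 1)
        (st.1 + 1, (if st.1 + 1 == 1 then 1 else st.2.1), st.1 + 1, i,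
         some (PySem.Str.slice t (some 2) (some (PySem.Str.len t - 2))))
    else gwLoop rest (i + 1) st

-- none = Python's UnboundLocalError on 'word' (no marked token); excluded by Pre_
def get_word (sentence : List String) : Option (String × Int × Int × Int × Int) :=
  let st := gwLoop sentence 0 (0, 0, 0, 0, none)
  match st.2.2.2.2 with
  | none => none
  | some w =>
    let isl : Int := if st.2.2.1 == st.1 then 1 else 0
    -- word[0].isupper(); word is never empty when assigned, so the getD default is never read
    let cap : Int := if ((PySem.Str.pyGet? w 0).map PySem.Chars.isupper).getD false then 1 else 0
    some (w, st.2.1, isl, cap, st.2.2.2.1)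

-- for i in range(index-1, -1, -1): if sentence[i].isalpha(): prev = sentence[i]; break
-- (every visited i is in range, so the "" default of pyGetD is never read; "" is not alphabetic)
def scanBack (sentence : List String) : List Int → String
  | [] => ""
  | i :: rest =>
    let t := PySem.List.pyGetD sentence i ""
    if PySem.Str.strIsalpha t then t else scanBack sentence rest

def prev_word (sentence : List String) : String :=
  match get_word sentence with
  | none => ""   -- unreachable under Pre_ (Python raises in get_word)
  | some r => scanBack sentence (PySem.List.pyRange (r.2.2.2.2 - 1) (-1) (-1))

-- ===== PORT B =====
def isMarkerB (t : String) : Bool :=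
  decide (4 < PySem.Str.len t) && PySem.Str.startswith t "[[" && PySem.Str.endswith t "]]"

-- state = (prev, last_alpha); prev = none is Python's sentinel None
def bStep (st : Option String × String) (t : String) : Option String × String :=
  if isMarkerB t then (some st.2, st.2)
  else if PySem.Str.strIsalpha t then (st.1, t)
  else st

def prev_word_alt (sentence : List String) : String :=
  match (sentence.foldl bStep (none, "")).1 with
  | none => ""   -- unreachable under Pre_ (Python raises ValueError)
  | some p => p

-- ===== PRECONDITION & SPEC =====
-- Pre_ excludes exactly the sentences with no [[marked]] token, on which A's get_word raises UnboundLocalError.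
def Pre_prev_word (sentence : List String) : Prop := sentence.any isMarkerA = true
instance (sentence : List String) : Decidable (Pre_prev_word sentence) := by
  unfold Pre_prev_word; infer_instance
def pvWitness_prev_word : List String := ["hi", "there", "[[word]]", "x1"]

def Spec_prev_word (sentence : List String) (out : String) : Prop := out = prev_word_alt sentence
instance (sentence : List String) (out : String) : Decidable (Spec_prev_word sentence out) := by
  unfold Spec_prev_word; infer_instance

-- ===== CLAIM (what is proved, stated in full; the proofs are below) =====
def Claim_equal_prev_word : Prop := ∀ (sentence : List String), Dom_prev_word sentence →
  Pre_prev_word sentence → Spec_prev_word sentence (prev_word sentence)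

-- ===== LEMMAS AND PROOFS =====

-- the two marker tests agree
theorem decomp {α : Type} (l : List α) (h : 4 < l.length) :
    ∃ a b mid y z, l = a :: b :: (mid ++ [y, z]) := by
  rcases l with _ | ⟨a, _ | ⟨b, rest⟩⟩
  · simp at h
  · simp at h
  · have hr2 : 2 < rest.length := by simpa using h
    rcases hr : rest.reverse with _ | ⟨z, _ | ⟨y, m⟩⟩
    · simp [List.reverse_eq_nil_iff] at hr; simp [hr] at hr2
    · have : rest = [z] := by
        have := congrArg List.reverse hr; simpa using this
      simp [this] at hr2
    · refine ⟨a, b, m.reverse, y, z, ?_⟩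
      have := congrArg List.reverse hr
      simp at this
      simp [this]

theorem markerA_eq_markerB (t : String) : isMarkerA t = isMarkerB t := by
  by_cases h4 : 4 < PySem.Str.len t
  · have hn : 4 < t.toList.length := by
      rw [PySem.Str.len_eq] at h4; exact_mod_cast h4
    obtain ⟨a, b, mid, y, z, hl⟩ := decomp t.toList hn
    have hlenN : t.toList.length = mid.length + 4 := by rw [hl]; simp
    have hlen : PySem.Str.len t = (mid.length : Int) + 4 := by
      rw [PySem.Str.len_eq, hlenN]; push_cast; ring
    have g0 : PySem.Str.pyGet? t 0 = some a := by
      simp [PySem.Str.pyGet?_eq, hl, PySem.List.pyGet?_zero]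
    have g1 : PySem.Str.pyGet? t 1 = some b := by
      simp [PySem.Str.pyGet?_eq, hl]
      rw [PySem.List.pyGet?_of_nonneg _ (by omega)]
      rfl
    have g2 : PySem.Str.pyGet? t (PySem.Str.len t - 2) = some y := by
      have hsplit : t.toList = (a :: b :: mid) ++ y :: [z] := by rw [hl]; rfl
      have e2 : PySem.Str.len t - 2 = ((a :: b :: mid).length : Int) := by
        rw [hlen]; simp only [List.length_cons]; push_cast; omega
      rw [e2, PySem.Str.pyGet?_eq, PySem.Chars.pyGet?_eq_listPyGet?, hsplit]
      exact PySem.List.pyGet?_append_length _ _ _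
    have g3 : PySem.Str.pyGet? t (PySem.Str.len t - 1) = some z := by
      have hsplit : t.toList = ((a :: b :: mid) ++ [y]) ++ z :: [] := by rw [hl]; simp
      have e3 : PySem.Str.len t - 1 = (((a :: b :: mid) ++ [y]).length : Int) := by
        rw [hlen]; simp only [List.length_append, List.length_cons, List.length_nil]
        push_cast; omega
      rw [e3, PySem.Str.pyGet?_eq, PySem.Chars.pyGet?_eq_listPyGet?, hsplit]
      exact PySem.List.pyGet?_append_length _ _ _
    have hpre : PySem.Str.startswith t "[[" = (decide (a = '[') && decide (b = '[')) := by
      rw [PySem.Str.startswith_eq]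
      have h2 : ("[[" : String).toList = ['[', '['] := by decide
      by_cases hab : a = '[' ∧ b = '['
      · rw [h2]
        rw [show PySem.Chars.startswith t.toList ['[', '['] = true from
          (PySem.Chars.startswith_iff _ _).mpr (by rw [hl, hab.1, hab.2]; simp [List.cons_prefix_cons])]
        simp [hab.1, hab.2]
      · have : PySem.Chars.startswith t.toList (("[[" : String).toList) = false := by
          rw [h2]
          by_contra hc
          rw [Bool.not_eq_false] at hc
          have := (PySem.Chars.startswith_iff _ _).mp hc
          rw [hl, List.cons_prefix_cons] at this
          obtain ⟨e1, this⟩ := this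
          rw [List.cons_prefix_cons] at this
          exact hab ⟨e1.symm, this.1.symm⟩
        rw [this]
        rcases Decidable.not_and_iff_or_not.mp hab with h | h <;> simp [h]
    have hsuf : PySem.Str.endswith t "]]" = (decide (y = ']') && decide (z = ']')) := by
      rw [PySem.Str.endswith_eq]
      have h2 : ("]]" : String).toList = [']', ']'] := by decide
      have hrev : t.toList.reverse = z :: y :: (mid.reverse ++ [b, a]) := by
        rw [hl]; simp
      by_cases hyz : y = ']' ∧ z = ']'
      · rw [h2]
        rw [show PySem.Chars.endswith t.toList [']', ']'] = true from
          (PySem.Chars.endswith_iff _ _).mpr (by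
            rw [← List.reverse_prefix, hrev, hyz.1, hyz.2]
            simp [List.cons_prefix_cons])]
        simp [hyz.1, hyz.2]
      · have : PySem.Chars.endswith t.toList (("]]" : String).toList) = false := by
          rw [h2]
          by_contra hc
          rw [Bool.not_eq_false] at hc
          have := (PySem.Chars.endswith_iff _ _).mp hc
          rw [← List.reverse_prefix, hrev] at this
          simp only [List.reverse_cons, List.reverse_nil, List.nil_append,
            List.singleton_append] at this
          rw [List.cons_prefix_cons] at this
          obtain ⟨e1, this⟩ := this
          rw [List.cons_prefix_cons] at this
          exact hyz ⟨this.1.symm, e1.symm⟩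
        rw [this]
        rcases Decidable.not_and_iff_or_not.mp hyz with h | h <;> simp [h]
    simp only [isMarkerA, isMarkerB, g0, g1, g2, g3, hpre, hsuf]
    simp only [h4, decide_true, Bool.true_and]
    by_cases e1 : a = '[' <;> by_cases e2 : b = '[' <;> by_cases e3 : y = ']' <;>
      by_cases e4 : z = ']' <;> simp [e1, e2, e3, e4]
  · have hf : decide (4 < PySem.Str.len t) = false := by simpa using h4
    unfold isMarkerA isMarkerB
    rw [hf]
    simp only [Bool.false_and]

theorem marker_not_alpha (t : String) (h : isMarkerA t = true) :
    PySem.Str.strIsalpha t = false := by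
  simp only [isMarkerA, Bool.and_eq_true, beq_iff_eq, decide_eq_true_eq] at h
  obtain ⟨⟨⟨⟨h4, g0⟩, g1⟩, g2⟩, g3⟩ := h
  rcases hl : t.toList with _ | ⟨c, r⟩
  · rw [PySem.Str.pyGet?_eq, PySem.Chars.pyGet?_eq_listPyGet?, hl] at g0
    simp [PySem.List.pyGet?_zero] at g0
  · have : c = '[' := by
      rw [PySem.Str.pyGet?_eq, PySem.Chars.pyGet?_eq_listPyGet?, hl,
        PySem.List.pyGet?_zero] at g0
      simpa using g0
    rw [PySem.Str.strIsalpha_eq, hl, this]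
    simp [PySem.Chars.strIsalpha]
    intro hc
    exact absurd hc (by decide)

-- last alphabetic token of the list, with default d
def lastAlpha : List String → String → String
  | [], d => d
  | t :: r, d => lastAlpha r (if PySem.Str.strIsalpha t then t else d)

theorem lastAlpha_append_singleton (u : List String) (t : String) (d : String) :
    lastAlpha (u ++ [t]) d = if PySem.Str.strIsalpha t then t else lastAlpha u d := by
  induction u generalizing d with
  | nil => rfl
  | cons a u ih => simp [lastAlpha, ih]

theorem scanBack_spec (u : List String) :
    ∀ w, scanBack (u ++ w) (PySem.List.pyRange ((u.length : Int) - 1) (-1) (-1)) =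
      lastAlpha u "" := by
  induction u using List.reverseRecOn with
  | nil =>
    intro w
    rw [PySem.List.pyRange_neg_one_eq_nil (by norm_num)]
    rfl
  | append_singleton u' t ih =>
    intro w
    have hlen : ((u' ++ [t]).length : Int) - 1 = (u'.length : Int) := by
      simp
    rw [hlen, PySem.List.pyRange_neg_one_cons (by omega)]
    have hassoc : (u' ++ [t]) ++ w = u' ++ t :: w := by simp
    have hget : PySem.List.pyGetD ((u' ++ [t]) ++ w) ((u'.length : Int)) "" = t := by
      rw [hassoc, PySem.List.pyGetD_natCast, List.getD_eq_getElem?_getD,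
        ← PySem.List.pyGet?_natCast, PySem.List.pyGet?_append_length]
      rfl
    rw [scanBack, hget, lastAlpha_append_singleton, hassoc]
    by_cases ha : PySem.Str.strIsalpha t = true
    · rw [if_pos ha, if_pos ha]
    · rw [if_neg ha, if_neg ha]
      exact ih (t :: w)

theorem gwLoop_append (x y : List String) : ∀ i st,
    gwLoop (x ++ y) i st = gwLoop y (i + x.length) (gwLoop x i st) := by
  induction x with
  | nil => intro i st; simp [gwLoop]
  | cons t x ih =>
    intro i st
    have harith : i + ((t :: x).length : Int) = (i + 1) + (x.length : Int) := by
      simp only [List.length_cons]; push_cast; ring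
    rw [List.cons_append, gwLoop, gwLoop, harith]
    split_ifs <;> rw [ih]

theorem gwLoop_no_marker (v : List String) (hv : ∀ t ∈ v, isMarkerA t = false) :
    ∀ i st, (gwLoop v i st).2.2.2 = st.2.2.2 := by
  induction v with
  | nil => intro i st; rfl
  | cons t v ih =>
    intro i st
    have hm : isMarkerA t = false := hv t (by simp)
    have hv' : ∀ t ∈ v, isMarkerA t = false := fun x hx => hv x (by simp [hx])
    rw [gwLoop]
    by_cases h1 : PySem.Str.strIsalpha t = true
    · rw [if_pos h1]
      exact (ih hv' _ _).trans (by simp)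
    · rw [if_neg h1, if_neg (by simp [hm])]
      exact ih hv' _ _

theorem prev_word_split (u : List String) (m : String) (v : List String)
    (hm : isMarkerA m = true) (hv : ∀ t ∈ v, isMarkerA t = false) :
    prev_word (u ++ m :: v) = lastAlpha u "" := by
  have hpair : (gwLoop (u ++ m :: v) 0 (0, 0, 0, 0, none)).2.2.2 =
      ((u.length : Int),
       some (PySem.Str.slice m (some 2) (some (PySem.Str.len m - 2)))) := by
    rw [gwLoop_append u (m :: v) 0 (0, 0, 0, 0, none)]
    rw [gwLoop]
    rw [if_neg (by rw [marker_not_alpha m hm]; simp), if_pos hm]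
    rw [gwLoop_no_marker v hv]
    simp
  rw [prev_word, get_word]
  simp only []
  rw [show (gwLoop (u ++ m :: v) 0 (0, 0, 0, 0, none)).2.2.2.2 =
      some (PySem.Str.slice m (some 2) (some (PySem.Str.len m - 2))) from
    congrArg Prod.snd hpair]
  simp only []
  rw [show (gwLoop (u ++ m :: v) 0 (0, 0, 0, 0, none)).2.2.2.1 = ((u.length : Int)) from
    congrArg Prod.fst hpair]
  exact scanBack_spec u (m :: v)

theorem foldl_bStep_snd (v : List String) :
    ∀ st : Option String × String, (v.foldl bStep st).2 = lastAlpha v st.2 := by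
  induction v with
  | nil => intro st; rfl
  | cons t v ih =>
    intro st
    rw [List.foldl_cons, lastAlpha, ih]
    by_cases hmB : isMarkerB t = true
    · have hna : PySem.Str.strIsalpha t = false :=
        marker_not_alpha t (by rw [markerA_eq_markerB]; exact hmB)
      rw [bStep, if_pos hmB, hna]
      simp
    · rw [Bool.not_eq_true] at hmB
      rw [bStep, if_neg (by simp [hmB])]
      by_cases ha : PySem.Chars.strIsalpha t.toList = true
      · simp [ha]
      · rw [Bool.not_eq_true] at ha
        simp [ha]

theorem foldl_bStep_fst_no_marker (v : List String) (hv : ∀ t ∈ v, isMarkerB t = false) :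
    ∀ st : Option String × String, (v.foldl bStep st).1 = st.1 := by
  induction v with
  | nil => intro st; rfl
  | cons t v ih =>
    intro st
    have hm : isMarkerB t = false := hv t (by simp)
    have hv' : ∀ t ∈ v, isMarkerB t = false := fun x hx => hv x (by simp [hx])
    rw [List.foldl_cons, bStep, if_neg (by simp [hm])]
    split_ifs <;> exact ih hv' _

theorem prev_word_alt_split (u : List String) (m : String) (v : List String)
    (hm : isMarkerA m = true) (hv : ∀ t ∈ v, isMarkerA t = false) :
    prev_word_alt (u ++ m :: v) = lastAlpha u "" := by
  have hmB : isMarkerB m = true := by rw [← markerA_eq_markerB]; exact hm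
  have hvB : ∀ t ∈ v, isMarkerB t = false := fun x hx => by
    rw [← markerA_eq_markerB]; exact hv x hx
  rw [prev_word_alt, List.foldl_append, List.foldl_cons, bStep, if_pos hmB]
  rw [foldl_bStep_fst_no_marker v hvB]
  simp only []
  rw [foldl_bStep_snd u (none, "")]

theorem exists_last_marker (s : List String) (h : s.any isMarkerA = true) :
    ∃ u m v, s = u ++ m :: v ∧ isMarkerA m = true ∧ ∀ t ∈ v, isMarkerA t = false := by
  induction s using List.reverseRecOn with
  | nil => simp at h
  | append_singleton s' t ih =>
    by_cases ht : isMarkerA t = true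
    · exact ⟨s', t, [], by simp, ht, by simp⟩
    · have h' : s'.any isMarkerA = true := by
        simp only [List.any_append, List.any_cons, List.any_nil, Bool.or_false,
          Bool.or_eq_true] at h
        rcases h with h | h
        · exact h
        · exact absurd h ht
      obtain ⟨u, m, v, rfl, hm, hv⟩ := ih h'
      exact ⟨u, m, v ++ [t], by simp, hm, by
        intro x hx
        rcases List.mem_append.mp hx with hx | hx
        · exact hv x hx
        · simp at hx; subst hx; simpa using ht⟩

-- ===== VERDICT (by name: the statement is the Claim_ definition above) =====
theorem prev_word_spec : Claim_equal_prev_word := by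
  intro sentence _ hpre
  unfold Spec_prev_word
  obtain ⟨u, m, v, rfl, hm, hv⟩ := exists_last_marker sentence hpre
  rw [prev_word_split u m v hm hv, prev_word_alt_split u m v hm hv]
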